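-- pv_equiv track=rewrite | github.com/CMSgov/qpp-measures-data | claims-related/tests/test_single_source_json.py | format_column_title
-- ===== SOURCE A (Python) =====
-- def format_column_title(c_name):
--     """Clean up a column title by removing/replacing special characters."""
--     str_patterns = {"([-,*'#])\n": "", " -./: ;": "_"}
--
--     for from_ch_g, to_ch in str_patterns.items():
--         for ch in from_ch_g:
--             c_name = c_name.replace(ch, to_ch).strip(" _")
--
--     if c_name.lower() == "measure_id":
--         return "measure"
--
--     return c_name.lower()
-- ===== SOURCE B (Python) =====
-- _TABLE = str.maketrans({**{ch: "" for ch in "([-,*'#])\n"},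
--                         **{ch: "_" for ch in " ./:;"}})
--
-- def format_column_title(c_name):
--     """Clean up a column title by removing/replacing special characters."""
--     result = c_name.translate(_TABLE).strip(" _").lower()
--     return "measure" if result == "measure_id" else result
-- ===== Notes on version B (the rewrite author's own statement) =====
-- stated objective: idiomatic
-- what changed: Replaced 17 sequential replace+strip passes over the string with a single translation-table pass (str.translate) followed by one strip and one lower.
import Mathlib
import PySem

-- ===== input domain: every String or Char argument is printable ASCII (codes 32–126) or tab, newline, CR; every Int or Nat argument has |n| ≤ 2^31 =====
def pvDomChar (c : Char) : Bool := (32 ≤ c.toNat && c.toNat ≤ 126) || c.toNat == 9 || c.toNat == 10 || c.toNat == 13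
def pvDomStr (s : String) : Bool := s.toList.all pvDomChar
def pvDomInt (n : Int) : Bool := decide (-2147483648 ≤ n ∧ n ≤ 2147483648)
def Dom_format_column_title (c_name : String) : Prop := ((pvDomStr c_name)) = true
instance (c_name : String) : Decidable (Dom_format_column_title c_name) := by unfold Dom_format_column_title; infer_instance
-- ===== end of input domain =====

-- B replaces A's 17 sequential replace+strip passes by one translation-table pass, then a single strip and lower (idiomatic single pass).

-- ===== PORT A =====
-- literal port of A: the dict literal's items in insertion order, two nested loops, replace+strip(" _") per character
def format_column_title (c_name : String) : String :=
  let str_patterns : List (String × String) := [("([-,*'#])\n", ""), (" -./: ;", "_")]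
  let c := str_patterns.foldl
    (fun c p => p.1.toList.foldl
      (fun c ch => PySem.Str.stripChars (PySem.Str.replace c (String.singleton ch) p.2) " _") c)
    c_name
  if PySem.Str.lower c = "measure_id" then "measure" else PySem.Str.lower c

-- ===== PORT B =====
-- the translation table of Source B: delete every char of "([-,*'#])\n", map every char of " ./:;" to '_'
def pvTable (c : Char) : List Char :=
  if ("([-,*'#])\n".toList).contains c then []
  else if ((" ./:;").toList).contains c then ['_']
  else [c]

def format_column_title_alt (c_name : String) : String :=
  let result := PySem.Str.lower (PySem.Str.stripChars (String.ofList (c_name.toList.flatMap pvTable)) " _")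
  if result = "measure_id" then "measure" else result

-- ===== PRECONDITION & SPEC =====
def Spec_format_column_title (c_name : String) (out : String) : Prop := out = format_column_title_alt c_name
instance (c_name : String) (out : String) : Decidable (Spec_format_column_title c_name out) := by unfold Spec_format_column_title; infer_instance

-- ===== CLAIM (what is proved, stated in full; the proofs are below) =====
def Claim_equal_format_column_title : Prop := ∀ (c_name : String), Dom_format_column_title c_name → Spec_format_column_title c_name (format_column_title c_name)

-- ===== LEMMAS AND PROOFS =====

-- replacement of one single character, as a per-character map
def Frepl (a : Char) (new : List Char) : Char → List Char := fun c => if c = a then new else [c]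

-- strip " _" on the list side
def pvSt (l : List Char) : List Char := PySem.Chars.stripChars l [' ', '_']

-- the 17 (char, replacement) steps of A, in A's order
def pvSteps : List (Char × List Char) :=
  [('(',[]),('[',[]),('-',[]),(',',[]),('*',[]),('\'',[]),('#',[]),(']',[]),(')',[]),('\n',[]),
   (' ',['_']),('-',['_']),('.',['_']),('/',['_']),(':',['_']),(' ',['_']),(';',['_'])]

def chainF (l : List Char) : List Char := pvSteps.foldl (fun x p => x.flatMap (Frepl p.1 p.2)) l

theorem replace_go_single (a : Char) (new : List Char) :
    ∀ (l : List Char) (fuel : Nat) (acc : List Char), l.length ≤ fuel →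
      PySem.Chars.replace.go [a] new fuel l acc = acc.reverse ++ l.flatMap (Frepl a new) := by
  intro l
  induction l with
  | nil =>
    intro fuel acc _
    cases fuel <;> simp [PySem.Chars.replace.go]
  | cons c t ih =>
    intro fuel acc h
    cases fuel with
    | zero => simp at h
    | succ f =>
      rw [PySem.Chars.replace.go]
      by_cases hca : c = a
      · subst hca
        have hpre : List.isPrefixOf [c] (c :: t) = true := by simp [List.isPrefixOf]
        rw [if_pos hpre]
        simp only [List.length_cons, List.length_nil, Nat.zero_add, List.drop_succ_cons, List.drop_zero]
        rw [ih f (new.reverse ++ acc) (by simpa using Nat.le_of_succ_le_succ h)]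
        simp [Frepl]
      · have hpre : List.isPrefixOf [a] (c :: t) = false := by
          simp [List.isPrefixOf]; exact fun h' => hca h'.symm
        rw [if_neg (by simp [hpre])]
        rw [ih f (c :: acc) (by simpa using Nat.le_of_succ_le_succ h)]
        simp [Frepl, hca]

theorem replace_single (cs : List Char) (a : Char) (new : List Char) :
    PySem.Chars.replace cs [a] new = cs.flatMap (Frepl a new) := by
  rw [PySem.Chars.replace]
  simp [replace_go_single a new cs cs.length [] (le_refl _)]

theorem pvSt_eq (l : List Char) : pvSt l =
    (List.dropWhile (fun c => ([' ', '_'] : List Char).contains c)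
      (List.dropWhile (fun c => ([' ', '_'] : List Char).contains c) l).reverse).reverse := rfl

theorem st_lpad (u v : List Char) (hu : ∀ x ∈ u, ([' ', '_'] : List Char).contains x = true) :
    pvSt (u ++ v) = pvSt v := by
  rw [pvSt_eq, pvSt_eq]
  have h : List.dropWhile (fun c => ([' ', '_'] : List Char).contains c) u = [] :=
    List.dropWhile_eq_nil_iff.mpr (by intro x hx; exact hu x hx)
  rw [List.dropWhile_append, h]
  simp

theorem st_rpad (v w : List Char) (hw : ∀ x ∈ w, ([' ', '_'] : List Char).contains x = true) :
    pvSt (v ++ w) = pvSt v := by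
  rw [pvSt_eq, pvSt_eq]
  have hw' : List.dropWhile (fun c => ([' ', '_'] : List Char).contains c) w = [] :=
    List.dropWhile_eq_nil_iff.mpr (by intro x hx; exact hw x hx)
  have hwr : List.dropWhile (fun c => ([' ', '_'] : List Char).contains c) w.reverse = [] :=
    List.dropWhile_eq_nil_iff.mpr (by intro x hx; exact hw x (by simpa using hx))
  rw [List.dropWhile_append, hw']
  by_cases hv : List.dropWhile (fun c => ([' ', '_'] : List Char).contains c) v = []
  · have hemp : (List.dropWhile (fun c => ([' ', '_'] : List Char).contains c) v).isEmpty = true := by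
      rw [hv]; rfl
    rw [if_pos hemp, hv]
  · rw [if_neg (by simpa using hv)]
    rw [List.reverse_append, List.dropWhile_append, hwr]
    simp

theorem st_decomp (y : List Char) :
    ∃ pre suf, y = pre ++ pvSt y ++ suf ∧
      (∀ x ∈ pre, ([' ', '_'] : List Char).contains x = true) ∧
      (∀ x ∈ suf, ([' ', '_'] : List Char).contains x = true) := by
  refine ⟨List.takeWhile (fun c => ([' ', '_'] : List Char).contains c) y,
    (List.takeWhile (fun c => ([' ', '_'] : List Char).contains c)
      (List.dropWhile (fun c => ([' ', '_'] : List Char).contains c) y).reverse).reverse, ?_, ?_, ?_⟩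
  · have h2 : List.dropWhile (fun c => ([' ', '_'] : List Char).contains c) y =
        pvSt y ++ (List.takeWhile (fun c => ([' ', '_'] : List Char).contains c)
          (List.dropWhile (fun c => ([' ', '_'] : List Char).contains c) y).reverse).reverse := by
      rw [pvSt_eq]
      conv_lhs => rw [← List.reverse_reverse
        (List.dropWhile (fun c => ([' ', '_'] : List Char).contains c) y),
        ← List.takeWhile_append_dropWhile (p := fun c => ([' ', '_'] : List Char).contains c)
          (l := (List.dropWhile (fun c => ([' ', '_'] : List Char).contains c) y).reverse),
        List.reverse_append]
    rw [List.append_assoc, ← h2, List.takeWhile_append_dropWhile]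
  · intro x hx; exact List.mem_takeWhile_imp hx
  · intro x hx
    rw [List.mem_reverse] at hx
    exact List.mem_takeWhile_imp hx

theorem frepl_all (a : Char) (new : List Char)
    (hnew : ∀ d ∈ new, ([' ', '_'] : List Char).contains d = true)
    (u : List Char) (hu : ∀ x ∈ u, ([' ', '_'] : List Char).contains x = true) :
    ∀ x ∈ u.flatMap (Frepl a new), ([' ', '_'] : List Char).contains x = true := by
  intro x hx
  rw [List.mem_flatMap] at hx
  obtain ⟨c, hc, hxc⟩ := hx
  unfold Frepl at hxc
  by_cases hca : c = a
  · rw [if_pos hca] at hxc; exact hnew x hxc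
  · rw [if_neg hca] at hxc
    simp at hxc
    rw [hxc]
    exact hu c hc

theorem st_absorb (a : Char) (new : List Char)
    (hnew : ∀ d ∈ new, ([' ', '_'] : List Char).contains d = true) (y : List Char) :
    pvSt ((pvSt y).flatMap (Frepl a new)) = pvSt (y.flatMap (Frepl a new)) := by
  obtain ⟨pre, suf, hy, hpre, hsuf⟩ := st_decomp y
  conv_rhs => rw [hy]
  rw [List.flatMap_append, List.flatMap_append]
  rw [st_rpad _ _ (frepl_all a new hnew suf hsuf)]
  rw [st_lpad _ _ (frepl_all a new hnew pre hpre)]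

theorem st_absorb0 (a : Char) (y : List Char) :
    pvSt ((pvSt y).flatMap (Frepl a [])) = pvSt (y.flatMap (Frepl a [])) :=
  st_absorb a [] (by simp) y

theorem st_absorbU (a : Char) (y : List Char) :
    pvSt ((pvSt y).flatMap (Frepl a ['_'])) = pvSt (y.flatMap (Frepl a ['_'])) :=
  st_absorb a ['_'] (by simp) y

theorem foldl_flatMap_append (st : List (Char × List Char)) :
    ∀ (u v : List Char),
      st.foldl (fun x p => x.flatMap (Frepl p.1 p.2)) (u ++ v) =
        st.foldl (fun x p => x.flatMap (Frepl p.1 p.2)) u ++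
          st.foldl (fun x p => x.flatMap (Frepl p.1 p.2)) v := by
  induction st with
  | nil => intro u v; rfl
  | cons q t ih =>
    intro u v
    rw [List.foldl_cons, List.foldl_cons, List.foldl_cons, List.flatMap_append]
    exact ih _ _

theorem foldl_flatMap_nil (st : List (Char × List Char)) :
    st.foldl (fun x p => x.flatMap (Frepl p.1 p.2)) [] = [] := by
  induction st with
  | nil => rfl
  | cons q t ih => rw [List.foldl_cons]; simpa using ih

theorem chainF_single (c : Char) : chainF [c] = pvTable c := by
  by_cases h1 : c = '(';  · subst h1; decide
  by_cases h2 : c = '[';  · subst h2; decide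
  by_cases h3 : c = '-';  · subst h3; decide
  by_cases h4 : c = ',';  · subst h4; decide
  by_cases h5 : c = '*';  · subst h5; decide
  by_cases h6 : c = '\''; · subst h6; decide
  by_cases h7 : c = '#';  · subst h7; decide
  by_cases h8 : c = ']';  · subst h8; decide
  by_cases h9 : c = ')';  · subst h9; decide
  by_cases h10 : c = '\n'; · subst h10; decide
  by_cases h11 : c = ' ';  · subst h11; decide
  by_cases h12 : c = '.';  · subst h12; decide
  by_cases h13 : c = '/';  · subst h13; decide
  by_cases h14 : c = ':';  · subst h14; decide
  by_cases h15 : c = ';';  · subst h15; decide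
  simp [chainF, pvSteps, List.foldl, Frepl, pvTable,
    h1, h2, h3, h4, h5, h6, h7, h8, h9, h10, h11, h12, h13, h14, h15]

theorem chainF_eq (l : List Char) : chainF l = l.flatMap pvTable := by
  induction l with
  | nil => exact foldl_flatMap_nil pvSteps
  | cons c t ih =>
    have h : chainF (c :: t) = chainF [c] ++ chainF t := foldl_flatMap_append pvSteps [c] t
    rw [h, ih, chainF_single]
    simp


theorem pvSt_def (l : List Char) : PySem.Chars.stripChars l [' ', '_'] = pvSt l := rfl


theorem chainF_unfold (l : List Char) : chainF l = (((((((((((((((((l.flatMap (Frepl '(' [])).flatMap (Frepl '[' [])).flatMap (Frepl '-' [])).flatMap (Frepl ',' [])).flatMap (Frepl '*' [])).flatMap (Frepl '\'' [])).flatMap (Frepl '#' [])).flatMap (Frepl ']' [])).flatMap (Frepl ')' [])).flatMap (Frepl '\n' [])).flatMap (Frepl ' ' ['_'])).flatMap (Frepl '-' ['_'])).flatMap (Frepl '.' ['_'])).flatMap (Frepl '/' ['_'])).flatMap (Frepl ':' ['_'])).flatMap (Frepl ' ' ['_'])).flatMap (Frepl ';' ['_'])) := by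
  simp only [chainF, pvSteps, List.foldl_cons, List.foldl_nil]

set_option maxHeartbeats 1000000 in
theorem core_toList (s : String) :
    ((PySem.Str.stripChars (PySem.Str.replace (PySem.Str.stripChars (PySem.Str.replace (PySem.Str.stripChars (PySem.Str.replace (PySem.Str.stripChars (PySem.Str.replace (PySem.Str.stripChars (PySem.Str.replace (PySem.Str.stripChars (PySem.Str.replace (PySem.Str.stripChars (PySem.Str.replace (PySem.Str.stripChars (PySem.Str.replace (PySem.Str.stripChars (PySem.Str.replace (PySem.Str.stripChars (PySem.Str.replace (PySem.Str.stripChars (PySem.Str.replace (PySem.Str.stripChars (PySem.Str.replace (PySem.Str.stripChars (PySem.Str.replace (PySem.Str.stripChars (PySem.Str.replace (PySem.Str.stripChars (PySem.Str.replace (PySem.Str.stripChars (PySem.Str.replace (PySem.Str.stripChars (PySem.Str.replace s (String.singleton '(') "") " _") (String.singleton '[') "") " _") (String.singleton '-') "") " _") (String.singleton ',') "") " _") (String.singleton '*') "") " _") (String.singleton '\'') "") " _") (String.singleton '#') "") " _") (String.singleton ']') "") " _") (String.singleton ')') "") " _") (String.singleton '\n') "") " _") (String.singleton ' ') "_") "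 _") (String.singleton '-') "_") " _") (String.singleton '.') "_") " _") (String.singleton '/') "_") " _") (String.singleton ':') "_") " _") (String.singleton ' ') "_") " _") (String.singleton ';') "_") " _")).toList = pvSt (s.toList.flatMap pvTable) := by
  simp only [PySem.Str.toList_stripChars, PySem.Str.toList_replace,
    String.toList_singleton,
    show ("" : String).toList = [] from rfl,
    show ("_" : String).toList = ['_'] from rfl,
    show (" _" : String).toList = [' ', '_'] from rfl,
    replace_single, pvSt_def, st_absorb0, st_absorbU]
  rw [← chainF_unfold, chainF_eq]

-- ===== VERDICT (by name: the statement is the Claim_ definition above) =====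
theorem format_column_title_spec : Claim_equal_format_column_title := by
  intro s _
  show (if PySem.Str.lower (PySem.Str.stripChars (PySem.Str.replace (PySem.Str.stripChars (PySem.Str.replace (PySem.Str.stripChars (PySem.Str.replace (PySem.Str.stripChars (PySem.Str.replace (PySem.Str.stripChars (PySem.Str.replace (PySem.Str.stripChars (PySem.Str.replace (PySem.Str.stripChars (PySem.Str.replace (PySem.Str.stripChars (PySem.Str.replace (PySem.Str.stripChars (PySem.Str.replace (PySem.Str.stripChars (PySem.Str.replace (PySem.Str.stripChars (PySem.Str.replace (PySem.Str.stripChars (PySem.Str.replace (PySem.Str.stripChars (PySem.Str.replace (PySem.Str.stripChars (PySem.Str.replace (PySem.Str.stripChars (PySem.Str.replace (PySem.Str.stripChars (PySem.Str.replace (PySem.Str.stripChars (PySem.Str.replace s (String.singleton '(') "") " _") (String.singleton '[') "") " _") (String.singleton '-') "") " _") (String.singleton ',') "") " _") (String.singleton '*') "") " _") (String.singleton '\'') "") " _") (String.singleton '#') "") " _") (String.singleton ']') "") " _") (String.singleton ')') "") " _") (String.singleton '\n') "") " _") (String.singleton ' ') "_") " _") (String.singleton '-') "_") " _") (String.singleton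 '.') "_") " _") (String.singleton '/') "_") " _") (String.singleton ':') "_") " _") (String.singleton ' ') "_") " _") (String.singleton ';') "_") " _") = "measure_id" then "measure"
        else PySem.Str.lower (PySem.Str.stripChars (PySem.Str.replace (PySem.Str.stripChars (PySem.Str.replace (PySem.Str.stripChars (PySem.Str.replace (PySem.Str.stripChars (PySem.Str.replace (PySem.Str.stripChars (PySem.Str.replace (PySem.Str.stripChars (PySem.Str.replace (PySem.Str.stripChars (PySem.Str.replace (PySem.Str.stripChars (PySem.Str.replace (PySem.Str.stripChars (PySem.Str.replace (PySem.Str.stripChars (PySem.Str.replace (PySem.Str.stripChars (PySem.Str.replace (PySem.Str.stripChars (PySem.Str.replace (PySem.Str.stripChars (PySem.Str.replace (PySem.Str.stripChars (PySem.Str.replace (PySem.Str.stripChars (PySem.Str.replace (PySem.Str.stripChars (PySem.Str.replace (PySem.Str.stripChars (PySem.Str.replace s (String.singleton '(') "") " _") (String.singleton '[') "") " _") (String.singleton '-') "") " _") (String.singleton ',') "") " _") (String.singleton '*') "") " _") (String.singleton '\'') "") " _") (String.singleton '#') "") " _") (String.singleton ']') "") " _") (String.singleton ')') "") " _") (String.singleton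 '\n') "") " _") (String.singleton ' ') "_") " _") (String.singleton '-') "_") " _") (String.singleton '.') "_") " _") (String.singleton '/') "_") " _") (String.singleton ':') "_") " _") (String.singleton ' ') "_") " _") (String.singleton ';') "_") " _")) =
       (if PySem.Str.lower (PySem.Str.stripChars (String.ofList (s.toList.flatMap pvTable)) " _") = "measure_id"
        then "measure"
        else PySem.Str.lower (PySem.Str.stripChars (String.ofList (s.toList.flatMap pvTable)) " _"))
  have hres : PySem.Str.lower (PySem.Str.stripChars (PySem.Str.replace (PySem.Str.stripChars (PySem.Str.replace (PySem.Str.stripChars (PySem.Str.replace (PySem.Str.stripChars (PySem.Str.replace (PySem.Str.stripChars (PySem.Str.replace (PySem.Str.stripChars (PySem.Str.replace (PySem.Str.stripChars (PySem.Str.replace (PySem.Str.stripChars (PySem.Str.replace (PySem.Str.stripChars (PySem.Str.replace (PySem.Str.stripChars (PySem.Str.replace (PySem.Str.stripChars (PySem.Str.replace (PySem.Str.stripChars (PySem.Str.replace (PySem.Str.stripChars (PySem.Str.replace (PySem.Str.stripChars (PySem.Str.replace (PySem.Str.stripChars (PySem.Str.replace (PySem.Str.stripChars (PySem.Str.replace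 (PySem.Str.stripChars (PySem.Str.replace s (String.singleton '(') "") " _") (String.singleton '[') "") " _") (String.singleton '-') "") " _") (String.singleton ',') "") " _") (String.singleton '*') "") " _") (String.singleton '\'') "") " _") (String.singleton '#') "") " _") (String.singleton ']') "") " _") (String.singleton ')') "") " _") (String.singleton '\n') "") " _") (String.singleton ' ') "_") " _") (String.singleton '-') "_") " _") (String.singleton '.') "_") " _") (String.singleton '/') "_") " _") (String.singleton ':') "_") " _") (String.singleton ' ') "_") " _") (String.singleton ';') "_") " _") =
      PySem.Str.lower (PySem.Str.stripChars (String.ofList (s.toList.flatMap pvTable)) " _") := by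
    rw [← String.toList_inj]
    rw [PySem.Str.toList_lower, PySem.Str.toList_lower, core_toList,
      PySem.Str.toList_stripChars, String.toList_ofList,
      show (" _" : String).toList = [' ', '_'] from rfl, pvSt_def]
  rw [hres]
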